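-- pv_equiv track=rewrite | github.com/Susu-cell/image-sharing-chain | test.py | n_match
-- ===== SOURCE A (Python) =====
-- def n_match(candidate, references, n):
--     match_n = 0
--     c = len(candidate)
--     r = len(references)
--     for i in range(c - n + 1):
--         for j in range(r - n + 1):
--             t1 = candidate[i:i + n]
--             t2 = references[j:j + n]
--             if t1 == t2:
--                 match_n += 1
--     return match_n
-- ===== SOURCE B (Python) =====
-- def n_match(candidate, references, n):
--     counts = {}
--     for j in range(len(references) - n + 1):
--         key = tuple(references[j:j + n])
--         counts[key] = counts.get(key, 0) + 1
--     return sum(counts.get(tuple(candidate[i:i + n]), 0)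
--                for i in range(len(candidate) - n + 1))
-- ===== Notes on version B (the rewrite author's own statement) =====
-- stated objective: faster
-- what changed: Replaces the nested candidate x references scan with a one-pass dict counting reference n-grams followed by one pass of lookups over candidate n-grams.
import Mathlib
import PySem

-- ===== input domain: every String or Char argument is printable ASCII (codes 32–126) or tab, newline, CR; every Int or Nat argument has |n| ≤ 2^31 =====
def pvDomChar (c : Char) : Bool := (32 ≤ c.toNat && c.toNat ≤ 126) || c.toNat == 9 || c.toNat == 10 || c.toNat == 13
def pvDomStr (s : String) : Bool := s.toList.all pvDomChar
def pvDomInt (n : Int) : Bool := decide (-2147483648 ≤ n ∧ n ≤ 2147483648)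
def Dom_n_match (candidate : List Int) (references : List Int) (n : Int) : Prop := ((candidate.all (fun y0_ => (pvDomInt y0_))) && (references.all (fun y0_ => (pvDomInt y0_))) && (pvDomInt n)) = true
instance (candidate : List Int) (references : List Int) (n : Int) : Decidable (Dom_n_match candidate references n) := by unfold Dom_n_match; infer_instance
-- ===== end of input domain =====

-- B replaces A's nested candidate x references scan by counting reference n-grams in one dict pass
-- and summing one lookup per candidate n-gram (objective: faster; same return value).


-- ===== PORT A =====
def n_match (candidate : List Int) (references : List Int) (n : Int) : Int :=
  let c : Int := candidate.length
  let r : Int := references.length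
  (PySem.List.pyRange 0 (c - n + 1) 1).foldl (fun match_n i =>
    (PySem.List.pyRange 0 (r - n + 1) 1).foldl (fun match_n j =>
      let t1 := PySem.List.slice candidate (some i) (some (i + n))
      let t2 := PySem.List.slice references (some j) (some (j + n))
      if t1 = t2 then match_n + 1 else match_n) match_n) 0

-- ===== PORT B =====
def n_match_alt (candidate : List Int) (references : List Int) (n : Int) : Int :=
  let counts : PySem.Dict (List Int) Int :=
    (PySem.List.pyRange 0 ((references.length : Int) - n + 1) 1).foldl (fun d j =>
      let key := PySem.List.slice references (some j) (some (j + n))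
      d.insert key (d.getD key 0 + 1)) PySem.Dict.empty
  ((PySem.List.pyRange 0 ((candidate.length : Int) - n + 1) 1).map (fun i =>
    counts.getD (PySem.List.slice candidate (some i) (some (i + n))) 0)).sum

-- ===== PRECONDITION & SPEC =====
def Spec_n_match (candidate : List Int) (references : List Int) (n : Int) (out : Int) : Prop := out = n_match_alt candidate references n
instance (candidate : List Int) (references : List Int) (n : Int) (out : Int) : Decidable (Spec_n_match candidate references n out) := by unfold Spec_n_match; infer_instance

-- ===== CLAIM (what is proved, stated in full; the proofs are below) =====
def Claim_equal_n_match : Prop := ∀ (candidate : List Int) (references : List Int) (n : Int), Dom_n_match candidate references n → Spec_n_match candidate references n (n_match candidate references n)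

-- ===== LEMMAS AND PROOFS =====

-- B's dict lookup for a candidate n-gram is the number of reference windows producing it.
theorem counts_getD_eq_count (js : List Int) (g : Int → List Int) (t : List Int) :
    ((js.foldl (fun d j => d.insert (g j) (d.getD (g j) 0 + 1)) PySem.Dict.empty).getD t 0)
      = ((js.map g).count t : Int) := by
  have h : js.foldl (fun d j => d.insert (g j) (d.getD (g j) 0 + 1)) (PySem.Dict.empty : PySem.Dict (List Int) Int)
      = (js.map g).foldl (fun d x => d.insert x (d.getD x 0 + 1)) PySem.Dict.empty :=
    (List.foldl_map (f := g) (g := fun (d : PySem.Dict (List Int) Int) x => d.insert x (d.getD x 0 + 1)) (l := js) (init := PySem.Dict.empty)).symm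
  rw [h]
  simpa using PySem.Dict.getD_foldl_insert_add_one (l := js.map g) (v := t) (d := PySem.Dict.empty)

-- A's inner loop adds, for a fixed candidate window t, the number of reference windows equal to t.
theorem inner_loop_eq_count (js : List Int) (g : Int → List Int) (t : List Int) (m : Int) :
    (js.foldl (fun acc j => if t = g j then acc + 1 else acc) m)
      = m + ((js.map g).count t : Int) := by
  have h := PySem.List.foldl_count_if (fun j => decide (t = g j)) js m
  simp only [decide_eq_true_eq] at h
  rw [h]
  congr 1
  rw [List.count_eq_countP, List.countP_map]
  norm_cast
  apply List.countP_congr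
  intro x _
  simp only [Function.comp_apply, beq_iff_eq, decide_eq_true_eq]
  exact eq_comm

-- ===== VERDICT (by name: the statement is the Claim_ definition above) =====
theorem n_match_spec : Claim_equal_n_match := by
  intro candidate references n _
  unfold Spec_n_match n_match n_match_alt
  simp only []
  set g : Int → List Int := fun j => PySem.List.slice references (some j) (some (j + n)) with hg
  set f : Int → List Int := fun i => PySem.List.slice candidate (some i) (some (i + n)) with hf
  set js := PySem.List.pyRange 0 ((references.length : Int) - n + 1) 1 with hjs
  have hinner : ∀ m i, (js.foldl (fun acc j => if f i = g j then acc + 1 else acc) m)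
      = m + ((js.map g).count (f i) : Int) := fun m i => inner_loop_eq_count js g (f i) m
  calc (PySem.List.pyRange 0 ((candidate.length : Int) - n + 1) 1).foldl
        (fun m i => js.foldl (fun acc j => if f i = g j then acc + 1 else acc) m) 0
      = (PySem.List.pyRange 0 ((candidate.length : Int) - n + 1) 1).foldl
        (fun m i => m + ((js.map g).count (f i) : Int)) 0 := by
        apply PySem.List.foldl_congr_mem
        intro m i _
        exact hinner m i
    _ = ((PySem.List.pyRange 0 ((candidate.length : Int) - n + 1) 1).map
          (fun i => ((js.map g).count (f i) : Int))).sum := by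
        simpa using PySem.List.foldl_add (PySem.List.pyRange 0 ((candidate.length : Int) - n + 1) 1)
          (fun i => ((js.map g).count (f i) : Int)) 0
    _ = ((PySem.List.pyRange 0 ((candidate.length : Int) - n + 1) 1).map (fun i =>
          (js.foldl (fun d j => d.insert (g j) (d.getD (g j) 0 + 1)) PySem.Dict.empty).getD (f i) 0)).sum := by
        congr 1
        apply List.map_congr_left
        intro i _
        exact (counts_getD_eq_count js g (f i)).symm
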